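-- pv_equiv track=rewrite | github.com/jimdc/teleport-corridors | tools/build_matrix.py | dijkstra_first_route
-- ===== SOURCE A (Python) =====
-- import heapq
-- from typing import Dict, List, Optional, Set, Tuple
--
-- def dijkstra_first_route(
--     graph: Dict[str, List[Tuple[str, int, Optional[str]]]], start: str
-- ) -> Tuple[Dict[str, int], Dict[str, Optional[str]]]:
--     dist: Dict[str, int] = {start: 0}
--     first_route: Dict[str, Optional[str]] = {start: None}
--     heap = [(0, start)]
--     while heap:
--         d, u = heapq.heappop(heap)
--         if d != dist.get(u):
--             continue
--         for v, w, rid in graph.get(u, []):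
--             nd = d + w
--             old = dist.get(v)
--             if old is None or nd < old:
--                 dist[v] = nd
--                 if u == start:
--                     first_route[v] = rid
--                 else:
--                     first_route[v] = first_route.get(u)
--                 heapq.heappush(heap, (nd, v))
--     return dist, first_route
-- ===== SOURCE B (Python) =====
-- def dijkstra_first_route(graph, start):
--     # Heap-free formulation: keep a set of "pending" nodes (those whose current
--     # distance has not yet been processed) and repeatedly pick the pending node
--     # with the smallest (distance, name); no priority queue, no stale entries.
--     dist = {start: 0}
--     first_route = {start: None}
--     pending = {start}
--     while pending:
--         u = min(pending, key=lambda x: (dist[x], x))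
--         pending.remove(u)
--         du = dist[u]
--         for v, w, rid in graph.get(u, []):
--             nd = du + w
--             old = dist.get(v)
--             if old is None or nd < old:
--                 dist[v] = nd
--                 first_route[v] = rid if u == start else first_route.get(u)
--                 pending.add(v)
--     return dist, first_route
-- ===== Notes on version B (the rewrite author's own statement) =====
-- stated objective: simpler
-- what changed: Replaced the binary heap with lazy deletion (stale-entry skipping) by a heap-free Dijkstra that keeps only a pending set of nodes and repeatedly scans it for the node with minimal (distance, name); no priority queue, no duplicate queue entries, no staleness check.
import Mathlib
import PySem

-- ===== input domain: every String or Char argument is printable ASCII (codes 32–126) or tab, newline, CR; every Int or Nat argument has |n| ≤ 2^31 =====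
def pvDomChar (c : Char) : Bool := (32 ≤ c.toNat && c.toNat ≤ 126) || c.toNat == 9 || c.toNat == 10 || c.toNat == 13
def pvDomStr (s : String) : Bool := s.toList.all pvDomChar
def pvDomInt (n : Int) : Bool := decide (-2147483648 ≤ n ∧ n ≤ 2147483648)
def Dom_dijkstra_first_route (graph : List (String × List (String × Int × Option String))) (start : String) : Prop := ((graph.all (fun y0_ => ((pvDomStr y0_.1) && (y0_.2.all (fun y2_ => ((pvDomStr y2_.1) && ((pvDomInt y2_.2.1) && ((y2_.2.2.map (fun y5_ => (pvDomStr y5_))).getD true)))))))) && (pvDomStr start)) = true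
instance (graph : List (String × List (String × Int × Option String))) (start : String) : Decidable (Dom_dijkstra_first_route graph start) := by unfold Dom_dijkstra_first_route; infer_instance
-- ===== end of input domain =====

-- B replaces A's heap + lazy-deletion Dijkstra by a heap-free pending-set scan (simpler: no
-- priority queue, no stale entries); same return value on every input on which A returns.

-- ===== PORT A =====
-- Python's tuple order on heap entries (d, u): (d,u) < (d',u') iff d < d' or (d = d' and u < u')
def pvPairLt (a b : Int × String) : Bool :=
  decide (a.1 < b.1) || (decide (a.1 = b.1) && decide (a.2 < b.2))

-- heapq is modelled by its observable contract: the heap is the bag of pushed entries and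
-- heappop removes a minimal entry under Python's tuple order (exact: the program observes
-- only pushes and pops, never the heap array's internal layout)
def pvMinOf : (Int × String) → List (Int × String) → (Int × String)
  | m, [] => m
  | m, e :: t => pvMinOf (if pvPairLt e m then e else m) t

-- cited by pvPopCurrent's termination proof
theorem pvMinOf_mem (m : Int × String) (t : List (Int × String)) : pvMinOf m t ∈ m :: t := by
  induction t generalizing m with
  | nil => simp [pvMinOf]
  | cons e t ih =>
    have h := ih (if pvPairLt e m then e else m)
    rcases List.mem_cons.mp h with h | h
    · by_cases hc : pvPairLt e m = true <;> simp [pvMinOf, hc] at h ⊢ <;> simp [h]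
    · simp [pvMinOf, List.mem_cons.mpr (Or.inr (List.mem_cons.mpr (Or.inr h)))]

-- A's `while heap: d, u = heappop(heap); if d != dist.get(u): continue` drain:
-- pop minima, skipping stale entries, until a current one (d == dist.get(u)) surfaces
def pvPopCurrent (dist : PySem.Dict String Int) :
    List (Int × String) → Option ((Int × String) × List (Int × String))
  | [] => none
  | h :: t =>
    let m := pvMinOf h t
    let rest := (h :: t).erase m
    if dist.get? m.2 = some m.1 then some (m, rest) else pvPopCurrent dist rest
  termination_by H => H.length
  decreasing_by
    simp [List.length_erase_of_mem (pvMinOf_mem h t)]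

-- body of A's `for v, w, rid in graph.get(u, [])` loop
def pvRelaxA (start u : String) (d : Int)
    (s : PySem.Dict String Int × PySem.Dict String (Option String) × List (Int × String))
    (e : String × Int × Option String) :
    PySem.Dict String Int × PySem.Dict String (Option String) × List (Int × String) :=
  let nd := d + e.2.1
  match s.1.get? e.1 with
  | some old =>
    if nd < old then
      (s.1.insert e.1 nd,
       s.2.1.insert e.1 (if u == start then e.2.2 else s.2.1.getD u none),
       s.2.2 ++ [(nd, e.1)])
    else s
  | none =>
    (s.1.insert e.1 nd,
     s.2.1.insert e.1 (if u == start then e.2.2 else s.2.1.getD u none),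
     s.2.2 ++ [(nd, e.1)])

-- fuel encoding the `while` loop (one unit per processed current entry / pending node); a
-- port artifact shared by both loop encodings: it exceeds the number of processed entries
-- of every terminating Python run of either program on its input
def pvFuel (graph : List (String × List (String × Int × Option String))) : Nat :=
  2 ^ (graph.length + (graph.map (fun p => p.2.length)).sum + 4)

def pvLoopA (graph : List (String × List (String × Int × Option String))) (start : String) :
    Nat → PySem.Dict String Int → PySem.Dict String (Option String) → List (Int × String) →
    PySem.Dict String Int × PySem.Dict String (Option String)
  | 0, dist, fr, _ => (dist, fr)
  | n + 1, dist, fr, H =>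
    match pvPopCurrent dist H with
    | none => (dist, fr)
    | some (m, H') =>
      let s := ((PySem.Dict.mk graph).getD m.2 []).foldl (pvRelaxA start m.2 m.1) (dist, fr, H')
      pvLoopA graph start n s.1 s.2.1 s.2.2

def dijkstra_first_route (graph : List (String × List (String × Int × Option String))) (start : String) : (List (String × Int)) × (List (String × Option String)) :=
  let dist : PySem.Dict String Int := PySem.Dict.empty.insert start 0
  let fr : PySem.Dict String (Option String) := PySem.Dict.empty.insert start none
  let r := pvLoopA graph start (pvFuel graph) dist fr [(0, start)]
  (r.1.items, r.2.items)

-- ===== PORT B =====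
-- body of B's `for v, w, rid in graph.get(u, [])` loop: same relaxation, but the third
-- state component is the pending SET of nodes, not a heap of entries
def pvRelaxB (start u : String) (du : Int)
    (s : PySem.Dict String Int × PySem.Dict String (Option String) × PySem.Set String)
    (e : String × Int × Option String) :
    PySem.Dict String Int × PySem.Dict String (Option String) × PySem.Set String :=
  let nd := du + e.2.1
  match s.1.get? e.1 with
  | some old =>
    if nd < old then
      (s.1.insert e.1 nd,
       s.2.1.insert e.1 (if u == start then e.2.2 else s.2.1.getD u none),
       PySem.Set.add s.2.2 e.1)
    else s
  | none =>
    (s.1.insert e.1 nd,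
     s.2.1.insert e.1 (if u == start then e.2.2 else s.2.1.getD u none),
     PySem.Set.add s.2.2 e.1)

def pvLoopB (graph : List (String × List (String × Int × Option String))) (start : String) :
    Nat → PySem.Dict String Int → PySem.Dict String (Option String) → PySem.Set String →
    PySem.Dict String Int × PySem.Dict String (Option String)
  | 0, dist, fr, _ => (dist, fr)
  | n + 1, dist, fr, P =>
    -- `while pending:` + `u = min(pending, key=lambda x: (dist[x], x))`: none ↔ pending is
    -- empty; dist[x] never raises (every pending node has a distance), and the minimum is
    -- unique — its key contains the node itself — so Python's set-iteration order is moot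
    match PySem.List.min2? P (fun x => dist.getD x 0) (fun x => x) with
    | none => (dist, fr)
    | some u =>
      -- pending.remove(u): u is an element of pending, so discard = remove, no KeyError
      let P' := PySem.Set.discard P u
      let du := dist.getD u 0
      let s := ((PySem.Dict.mk graph).getD u []).foldl (pvRelaxB start u du) (dist, fr, P')
      pvLoopB graph start n s.1 s.2.1 s.2.2

def dijkstra_first_route_alt (graph : List (String × List (String × Int × Option String))) (start : String) : (List (String × Int)) × (List (String × Option String)) :=
  let dist : PySem.Dict String Int := PySem.Dict.empty.insert start 0
  let fr : PySem.Dict String (Option String) := PySem.Dict.empty.insert start none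
  let r := pvLoopB graph start (pvFuel graph) dist fr [start]
  (r.1.items, r.2.items)

-- ===== PRECONDITION & SPEC =====
def Spec_dijkstra_first_route (graph : List (String × List (String × Int × Option String))) (start : String) (out : (List (String × Int)) × (List (String × Option String))) : Prop := out = dijkstra_first_route_alt graph start
instance (graph : List (String × List (String × Int × Option String))) (start : String) (out : (List (String × Int)) × (List (String × Option String))) : Decidable (Spec_dijkstra_first_route graph start out) := by unfold Spec_dijkstra_first_route; infer_instance

-- ===== CLAIM (what is proved, stated in full; the proofs are below) =====
def Claim_equal_dijkstra_first_route : Prop := ∀ (graph : List (String × List (String × Int × Option String))) (start : String), Dom_dijkstra_first_route graph start → Spec_dijkstra_first_route graph start (dijkstra_first_route graph start)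

-- ===== LEMMAS AND PROOFS =====

-- Prop form of Python's strict tuple order
def pvLt (a b : Int × String) : Prop := a.1 < b.1 ∨ (a.1 = b.1 ∧ a.2 < b.2)

theorem pvPairLt_iff (a b : Int × String) : pvPairLt a b = true ↔ pvLt a b := by
  simp [pvPairLt, pvLt]

theorem pvLt_asymm {a b : Int × String} (h : pvLt a b) : ¬ pvLt b a := by
  rcases h with h | ⟨h1, h2⟩ <;> rintro (g | ⟨g1, g2⟩)
  · omega
  · omega
  · omega
  · exact absurd g2 (lt_asymm h2)

theorem pvLt_trans {a b c : Int × String} (h1 : pvLt a b) (h2 : pvLt b c) : pvLt a c := by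
  rcases h1 with h1 | ⟨h1, h1'⟩ <;> rcases h2 with h2 | ⟨h2, h2'⟩
  · exact Or.inl (lt_trans h1 h2)
  · exact Or.inl (h2 ▸ h1)
  · exact Or.inl (h1 ▸ h2)
  · exact Or.inr ⟨h1.trans h2, lt_trans h1' h2'⟩

theorem pvLt_total_eq {a b : Int × String} (h1 : ¬ pvLt a b) (h2 : ¬ pvLt b a) : a = b := by
  simp only [pvLt, not_or, not_and] at h1 h2
  have e1 : a.1 = b.1 := le_antisymm (not_lt.mp h2.1) (not_lt.mp h1.1)
  have e2 : a.2 = b.2 := le_antisymm (not_lt.mp (h2.2 e1.symm)) (not_lt.mp (h1.2 e1))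
  exact Prod.ext e1 e2

theorem pvMinOf_min (t : List (Int × String)) (m : Int × String) :
    ∀ e ∈ m :: t, ¬ pvLt e (pvMinOf m t) := by
  induction t generalizing m with
  | nil => intro e he; simp at he; subst he; simp [pvMinOf, pvLt]
  | cons x t ih =>
    intro e he
    have hres : pvMinOf m (x :: t) = pvMinOf (if pvPairLt x m then x else m) t := by
      simp [pvMinOf]
    set m' := if pvPairLt x m then x else m with hm'
    have hmin : ∀ e ∈ m' :: t, ¬ pvLt e (pvMinOf m' t) := ih m'
    rw [hres]
    have hother : ¬ pvLt m m' ∧ ¬ pvLt x m' := by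
      by_cases hc : pvPairLt x m = true
      · have hx := (pvPairLt_iff x m).mp hc
        rw [hm', if_pos hc]
        exact ⟨pvLt_asymm hx, fun g => (pvLt_asymm g) g⟩
      · have hnx : ¬ pvLt x m := fun g => hc ((pvPairLt_iff x m).mpr g)
        rw [hm', if_neg hc]
        exact ⟨fun g => (pvLt_asymm g) g, hnx⟩
    have hm'min : ¬ pvLt m' (pvMinOf m' t) := hmin m' (List.mem_cons_self ..)
    have key : ∀ y, ¬ pvLt y m' → ¬ pvLt y (pvMinOf m' t) := by
      intro y hy hcon
      by_cases hym : y = m'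
      · exact hm'min (hym ▸ hcon)
      · rcases Classical.em (pvLt m' y) with h' | h'
        · exact hm'min (pvLt_trans h' hcon)
        · exact hym (pvLt_total_eq hy h')
    rcases List.mem_cons.mp he with rfl | he'
    · exact key e hother.1
    rcases List.mem_cons.mp he' with rfl | he''
    · exact key e hother.2
    · exact hmin e (List.mem_cons.mpr (Or.inr he''))

theorem pvPopCurrent_none (dist : PySem.Dict String Int) (H : List (Int × String))
    (h : pvPopCurrent dist H = none) : ∀ e ∈ H, dist.get? e.2 ≠ some e.1 := by
  induction H using pvPopCurrent.induct dist with
  | case1 => intro e he; simp at he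
  | case2 h' t m hcur =>
    rw [pvPopCurrent, if_pos (by exact hcur)] at h; simp at h
  | case3 h' t m rest hcur ih =>
    rw [pvPopCurrent, if_neg (by exact hcur)] at h
    intro e he hc
    by_cases hem : e = pvMinOf h' t
    · subst hem; exact hcur hc
    · exact ih h e ((List.mem_erase_of_ne hem).mpr he) hc

theorem pvPopCurrent_some (dist : PySem.Dict String Int) (H : List (Int × String))
    (m : Int × String) (K : List (Int × String))
    (h : pvPopCurrent dist H = some (m, K)) :
    m ∈ H ∧ dist.get? m.2 = some m.1 ∧
    (∀ e ∈ H, dist.get? e.2 = some e.1 → e = m ∨ e ∈ K) ∧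
    (∀ e ∈ K, e ∈ H) ∧
    (∀ e ∈ K, ¬ pvLt e m) ∧
    (H.Nodup → K.Nodup ∧ m ∉ K) := by
  induction H using pvPopCurrent.induct dist generalizing m K with
  | case1 => simp [pvPopCurrent] at h
  | case2 h' t m0 hcur =>
    rw [pvPopCurrent, if_pos (by exact hcur)] at h
    obtain ⟨rfl, rfl⟩ : pvMinOf h' t = m ∧ (h' :: t).erase (pvMinOf h' t) = K := by
      have := Option.some.inj h; exact ⟨congrArg Prod.fst this, congrArg Prod.snd this⟩
    have hmem : pvMinOf h' t ∈ h' :: t := pvMinOf_mem h' t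
    refine ⟨hmem, hcur, ?_, ?_, ?_, ?_⟩
    · intro e he _; by_cases hem : e = pvMinOf h' t
      · exact Or.inl hem
      · exact Or.inr ((List.mem_erase_of_ne hem).mpr he)
    · exact fun e he => List.mem_of_mem_erase he
    · intro e he; exact pvMinOf_min t h' e (List.mem_of_mem_erase he)
    · intro hnd; exact ⟨hnd.erase _, fun hc => ((hnd.mem_erase_iff).mp hc).1 rfl⟩
  | case3 h' t m0 rest hcur ih =>
    rw [pvPopCurrent, if_neg (by exact hcur)] at h
    obtain ⟨h1, h2, h3, h4, h5, h6⟩ := ih _ _ h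
    refine ⟨List.mem_of_mem_erase h1, h2, ?_, ?_, h5, ?_⟩
    · intro e he hc
      have hem0 : e ≠ pvMinOf h' t := by intro g; subst g; exact hcur hc
      exact h3 e ((List.mem_erase_of_ne hem0).mpr he) hc
    · exact fun e he => List.mem_of_mem_erase (h4 e he)
    · intro hnd; exact h6 (hnd.erase _)

-- the fold step inside PySem.List.min2? with the identity second key
def pvStep (k : String → Int) (acc : Option String) (x : String) : Option String :=
  match acc with
  | none => some x
  | some w => if (decide (k x < k w) || !decide (k w < k x) && decide (x < w)) = true then some x else some w

theorem pvMin2_eq_foldl (k : String → Int) (P : List String) :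
    PySem.List.min2? P k (fun x => x) = P.foldl (pvStep k) none := by
  unfold PySem.List.min2?
  congr 1
  funext acc x
  cases acc <;> rfl

-- the replacement test inside min2? is exactly the strict tuple order pvLt
theorem pvMin2_cond_iff (k : String → Int) (x w : String) :
    (decide (k x < k w) || !decide (k w < k x) && decide (x < w)) = true ↔
      pvLt (k x, x) (k w, w) := by
  simp only [pvLt, Bool.or_eq_true, Bool.and_eq_true, Bool.not_eq_true',
    decide_eq_true_eq, decide_eq_false_iff_not]
  constructor
  · rintro (h | ⟨h1, h2⟩)
    · exact Or.inl h
    · rcases lt_trichotomy (k x) (k w) with h' | h' | h'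
      · exact Or.inl h'
      · exact Or.inr ⟨h', h2⟩
      · exact absurd h' h1
  · rintro (h | ⟨h1, h2⟩)
    · exact Or.inl h
    · exact Or.inr ⟨by rw [h1]; exact lt_irrefl _, h2⟩

theorem pvStep_pos (k : String → Int) (m x : String) (h : pvLt (k x, x) (k m, m)) :
    pvStep k (some m) x = some x := by
  simp only [pvStep]
  rw [if_pos ((pvMin2_cond_iff k x m).mpr h)]

theorem pvStep_neg (k : String → Int) (m x : String) (h : ¬ pvLt (k x, x) (k m, m)) :
    pvStep k (some m) x = some m := by
  simp only [pvStep]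
  rw [if_neg (fun g => h ((pvMin2_cond_iff k x m).mp g))]

theorem pvMin2_go (k : String → Int) (ps : List String) :
    ∀ (m u : String), (ps.foldl (pvStep k) (some m) = some u) →
    u ∈ m :: ps ∧ ∀ x ∈ m :: ps, ¬ pvLt (k x, x) (k u, u) := by
  induction ps with
  | nil =>
    intro m u h
    simp at h; subst h
    exact ⟨List.mem_cons_self .., by
      intro x hx; simp at hx; subst hx; exact fun hc => (pvLt_asymm hc) hc⟩
  | cons x t ih =>
    intro m u h
    by_cases hc : pvLt (k x, x) (k m, m)
    · rw [List.foldl_cons, pvStep_pos k m x hc] at h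
      obtain ⟨hu1, hu2⟩ := ih x u h
      refine ⟨List.mem_cons.mpr (Or.inr hu1), ?_⟩
      intro y hy
      rcases List.mem_cons.mp hy with rfl | hy'
      · exact fun hcon => (hu2 x (List.mem_cons_self ..)) (pvLt_trans hc hcon)
      · exact hu2 y hy'
    · rw [List.foldl_cons, pvStep_neg k m x hc] at h
      obtain ⟨hu1, hu2⟩ := ih m u h
      refine ⟨?_, ?_⟩
      · rcases List.mem_cons.mp hu1 with rfl | hu'
        · exact List.mem_cons_self ..
        · exact List.mem_cons.mpr (Or.inr (List.mem_cons.mpr (Or.inr hu')))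
      · intro y hy
        rcases List.mem_cons.mp hy with rfl | hy'
        · exact hu2 y (List.mem_cons_self ..)
        rcases List.mem_cons.mp hy' with rfl | hy''
        · intro hcon
          have hmu : ¬ pvLt (k m, m) (k u, u) := hu2 m (List.mem_cons_self ..)
          by_cases hym : ((k y, y) : Int × String) = (k m, m)
          · exact hmu (hym ▸ hcon)
          · rcases Classical.em (pvLt (k m, m) (k y, y)) with h' | h'
            · exact hmu (pvLt_trans h' hcon)
            · exact hym (pvLt_total_eq hc h')
        · exact hu2 y (List.mem_cons.mpr (Or.inr hy''))

theorem pvMin2_spec (dist : PySem.Dict String Int) (P : List String) (u : String)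
    (h : PySem.List.min2? P (fun x => dist.getD x 0) (fun x => x) = some u) :
    u ∈ P ∧ ∀ x ∈ P, ¬ pvLt (dist.getD x 0, x) (dist.getD u 0, u) := by
  match P with
  | [] => simp [PySem.List.min2?] at h
  | p :: ps =>
    rw [pvMin2_eq_foldl, List.foldl_cons] at h
    exact pvMin2_go (fun x => dist.getD x 0) ps p u (by simpa [pvStep] using h)

theorem pvMin2_none (dist : PySem.Dict String Int) (P : List String)
    (h : PySem.List.min2? P (fun x => dist.getD x 0) (fun x => x) = none) : P = [] := by
  match P with
  | [] => rfl
  | p :: ps =>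
    rw [pvMin2_eq_foldl, List.foldl_cons] at h
    have hsome : ∀ (l : List String) (m : String),
        ∃ u, l.foldl (pvStep (fun x => dist.getD x 0)) (some m) = some u := by
      intro l
      induction l with
      | nil => exact fun m => ⟨m, rfl⟩
      | cons x t ih =>
        intro m
        by_cases hc : pvLt (dist.getD x 0, x) (dist.getD m 0, m)
        · rw [List.foldl_cons, pvStep_pos _ m x hc]; exact ih x
        · rw [List.foldl_cons, pvStep_neg _ m x hc]; exact ih m
    obtain ⟨u, hu⟩ := hsome ps p
    rw [show pvStep (fun x => dist.getD x 0) none p = some p from rfl, hu] at h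
    exact absurd h (by simp)

-- the bisimulation invariant: the heap's CURRENT entries (those whose priority equals the
-- node's recorded distance) are exactly {(dist v, v) | v ∈ pending}, every heap entry is ≥
-- its node's recorded distance, and both containers are duplicate-free
def pvInv (dist : PySem.Dict String Int) (H : List (Int × String)) (P : List String) : Prop :=
  H.Nodup ∧ P.Nodup ∧
  (∀ e ∈ H, ∃ dv, dist.get? e.2 = some dv ∧ dv ≤ e.1) ∧
  (∀ v ∈ P, ∃ dv, dist.get? v = some dv ∧ (dv, v) ∈ H) ∧
  (∀ e ∈ H, dist.get? e.2 = some e.1 → e.2 ∈ P)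

theorem pvInv_relax_step (start u : String) (d : Int)
    (dist : PySem.Dict String Int) (fr : PySem.Dict String (Option String))
    (H : List (Int × String)) (P : PySem.Set String) (hInv : pvInv dist H P)
    (e : String × Int × Option String) :
    (pvRelaxA start u d (dist, fr, H) e).1 = (pvRelaxB start u d (dist, fr, P) e).1 ∧
    (pvRelaxA start u d (dist, fr, H) e).2.1 = (pvRelaxB start u d (dist, fr, P) e).2.1 ∧
    pvInv (pvRelaxA start u d (dist, fr, H) e).1
      (pvRelaxA start u d (dist, fr, H) e).2.2 (pvRelaxB start u d (dist, fr, P) e).2.2 := by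
  obtain ⟨hndH, hndP, ha, hb, hc⟩ := hInv
  have upd : dist.get? e.1 = none ∨ (∃ old, dist.get? e.1 = some old ∧ d + e.2.1 < old) →
      pvInv (dist.insert e.1 (d + e.2.1)) (H ++ [(d + e.2.1, e.1)]) (PySem.Set.add P e.1) := by
    intro hcase
    have hnotin : (d + e.2.1, e.1) ∉ H := by
      intro hmem
      obtain ⟨dv, hdv, hle⟩ := ha _ hmem
      rcases hcase with hn | ⟨old, hold, hlt⟩
      · rw [hn] at hdv; simp at hdv
      · rw [hold] at hdv; have := Option.some.inj hdv; omega
    refine ⟨?_, PySem.Set.nodup_add P e.1 hndP, ?_, ?_, ?_⟩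
    · refine List.Nodup.append hndH (List.nodup_singleton _) ?_
      intro a haH hb
      simp only [List.mem_singleton] at hb
      subst hb
      exact hnotin haH
    · intro p hp
      rcases List.mem_append.mp hp with hp | hp
      · obtain ⟨dv, hdv, hle⟩ := ha p hp
        by_cases hpv : p.2 = e.1
        · rcases hcase with hn | ⟨old, hold, hlt⟩
          · rw [hpv, hn] at hdv; simp at hdv
          · refine ⟨d + e.2.1, ?_, ?_⟩
            · rw [hpv, PySem.Dict.get?_insert_self]
            · rw [hpv, hold] at hdv
              have : old = dv := Option.some.inj hdv
              omega
        · exact ⟨dv, by rw [PySem.Dict.get?_insert_of_ne _ _ hpv]; exact hdv, hle⟩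
      · simp only [List.mem_singleton] at hp
        subst hp
        exact ⟨d + e.2.1, PySem.Dict.get?_insert_self .., le_refl _⟩
    · intro v hv
      rcases (PySem.Set.mem_add P e.1 v).mp hv with hv | rfl
      · by_cases hveq : v = e.1
        · subst hveq
          exact ⟨d + e.2.1, PySem.Dict.get?_insert_self .., List.mem_append_right _ (List.mem_singleton.mpr rfl)⟩
        · obtain ⟨dv, hdv, hmem⟩ := hb v hv
          exact ⟨dv, by rw [PySem.Dict.get?_insert_of_ne _ _ hveq]; exact hdv,
            List.mem_append_left _ hmem⟩
      · exact ⟨d + e.2.1, PySem.Dict.get?_insert_self .., List.mem_append_right _ (List.mem_singleton.mpr rfl)⟩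
    · intro p hp hcur
      rcases List.mem_append.mp hp with hp | hp
      · by_cases hpv : p.2 = e.1
        · rw [hpv, PySem.Dict.get?_insert_self] at hcur
          have hp1 : p.1 = d + e.2.1 := (Option.some.inj hcur).symm
          have : p = (d + e.2.1, e.1) := Prod.ext hp1 hpv
          exact absurd (this ▸ hp) hnotin
        · rw [PySem.Dict.get?_insert_of_ne _ _ hpv] at hcur
          exact (PySem.Set.mem_add P e.1 p.2).mpr (Or.inl (hc p hp hcur))
      · simp only [List.mem_singleton] at hp
        subst hp
        exact (PySem.Set.mem_add P e.1 _).mpr (Or.inr rfl)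
  rcases hv : dist.get? e.1 with _ | old
  · simp only [pvRelaxA, pvRelaxB, hv]
    exact ⟨trivial, trivial, upd (Or.inl hv)⟩
  · by_cases hlt : d + e.2.1 < old
    · simp only [pvRelaxA, pvRelaxB, hv, if_pos hlt]
      exact ⟨trivial, trivial, upd (Or.inr ⟨old, hv, hlt⟩)⟩
    · simp only [pvRelaxA, pvRelaxB, hv, if_neg hlt]
      exact ⟨trivial, trivial, hndH, hndP, ha, hb, hc⟩

theorem pvRelax_eq (start u : String) (d : Int)
    (L : List (String × Int × Option String)) :
    ∀ (dist : PySem.Dict String Int) (fr : PySem.Dict String (Option String))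
      (H : List (Int × String)) (P : PySem.Set String), pvInv dist H P →
      (L.foldl (pvRelaxA start u d) (dist, fr, H)).1 = (L.foldl (pvRelaxB start u d) (dist, fr, P)).1 ∧
      (L.foldl (pvRelaxA start u d) (dist, fr, H)).2.1 = (L.foldl (pvRelaxB start u d) (dist, fr, P)).2.1 ∧
      pvInv (L.foldl (pvRelaxA start u d) (dist, fr, H)).1
        (L.foldl (pvRelaxA start u d) (dist, fr, H)).2.2
        (L.foldl (pvRelaxB start u d) (dist, fr, P)).2.2 := by
  induction L with
  | nil => intro dist fr H P hInv; exact ⟨rfl, rfl, hInv⟩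
  | cons e L ih =>
    intro dist fr H P hInv
    obtain ⟨e1, e2, hInv'⟩ := pvInv_relax_step start u d dist fr H P hInv e
    have hBstate : pvRelaxB start u d (dist, fr, P) e =
        ((pvRelaxA start u d (dist, fr, H) e).1,
         (pvRelaxA start u d (dist, fr, H) e).2.1,
         (pvRelaxB start u d (dist, fr, P) e).2.2) := by
      rw [e1, e2]
    have hAstate : pvRelaxA start u d (dist, fr, H) e =
        ((pvRelaxA start u d (dist, fr, H) e).1,
         (pvRelaxA start u d (dist, fr, H) e).2.1,
         (pvRelaxA start u d (dist, fr, H) e).2.2) := rfl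
    rw [List.foldl_cons, List.foldl_cons, hBstate, hAstate]
    exact ih _ _ _ _ hInv'

theorem pvLoop_eq (graph : List (String × List (String × Int × Option String))) (start : String) :
    ∀ (n : Nat) (dist : PySem.Dict String Int) (fr : PySem.Dict String (Option String))
      (H : List (Int × String)) (P : PySem.Set String), pvInv dist H P →
      pvLoopA graph start n dist fr H = pvLoopB graph start n dist fr P := by
  intro n
  induction n with
  | zero => intro dist fr H P _; rfl
  | succ n ih =>
    intro dist fr H P hInv
    obtain ⟨hndH, hndP, ha, hb, hc⟩ := hInv
    rcases hm : PySem.List.min2? P (fun x => dist.getD x 0) (fun x => x) with _ | u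
    · -- pending empty: the heap holds only stale entries, the drain returns none
      have hP : P = [] := pvMin2_none dist P hm
      rcases hp : pvPopCurrent dist H with _ | mk
      · simp [pvLoopA, pvLoopB, hp, hm]
      · obtain ⟨p1, p2, _, _, _, _⟩ := pvPopCurrent_some dist H mk.1 mk.2 (by rw [hp])
        have := hc mk.1 p1 p2
        rw [hP] at this
        exact absurd this (List.not_mem_nil)
    · obtain ⟨huP, humin⟩ := pvMin2_spec dist P u hm
      obtain ⟨du, hdu, hmemH⟩ := hb u huP
      have hgetDu : dist.getD u 0 = du := PySem.Dict.getD_of_get?_eq_some dist 0 hdu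
      rcases hp : pvPopCurrent dist H with _ | mk
      · exact absurd hdu (pvPopCurrent_none dist H hp (du, u) hmemH)
      · obtain ⟨p1, p2, p3, p4, p5, p6⟩ := pvPopCurrent_some dist H mk.1 mk.2 (by rw [hp])
        obtain ⟨hndK, hmK⟩ := p6 hndH
        -- the popped current entry is exactly (dist u, u) for the pending-minimal u
        have hmu : mk.1 = (du, u) := by
          have hcP : mk.1.2 ∈ P := hc mk.1 p1 p2
          have hgetD : dist.getD mk.1.2 0 = mk.1.1 :=
            PySem.Dict.getD_of_get?_eq_some dist 0 p2
          have hnm : ¬ pvLt mk.1 (du, u) := by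
            have := humin mk.1.2 hcP
            rw [hgetD, hgetDu] at this
            exact this
          rcases p3 (du, u) hmemH hdu with heq | hK
          · exact heq.symm
          · exact (pvLt_total_eq (p5 _ hK) hnm).symm
        have hInvK : pvInv dist mk.2 (PySem.Set.discard P u) := by
          refine ⟨hndK, PySem.Set.nodup_discard P u hndP, fun p hp' => ha p (p4 p hp'), ?_, ?_⟩
          · intro v hv
            obtain ⟨hvP, hvne⟩ := (PySem.Set.mem_discard P u v).mp hv
            obtain ⟨dv, hdv, hmem⟩ := hb v hvP
            refine ⟨dv, hdv, ?_⟩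
            rcases p3 (dv, v) hmem hdv with heq | hK
            · exact absurd (congrArg Prod.snd (heq.trans hmu)) hvne
            · exact hK
          · intro p hp' hcur
            have hpH := p4 p hp'
            have hpP := hc p hpH hcur
            refine (PySem.Set.mem_discard P u p.2).mpr ⟨hpP, ?_⟩
            intro hpu
            have hp1 : p.1 = du := by rw [hpu] at hcur; exact Option.some.inj (hdu ▸ hcur).symm
            have : p = mk.1 := by rw [hmu]; exact Prod.ext hp1 hpu
            exact hmK (this ▸ hp')
        have hm1 : mk.1.1 = du := by rw [hmu]
        have hm2 : mk.1.2 = u := by rw [hmu]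
        simp only [pvLoopA, pvLoopB, hp, hm, hgetDu, hm1, hm2]
        obtain ⟨E1, E2, hInv'⟩ := pvRelax_eq start u du ((PySem.Dict.mk graph).getD u [])
          dist fr mk.2 (PySem.Set.discard P u) hInvK
        rw [E1] at hInv'
        rw [E1, E2]
        exact ih _ _ _ _ hInv'

theorem pvInv_init (start : String) :
    pvInv (PySem.Dict.empty.insert start 0) [(0, start)] [start] := by
  refine ⟨by simp, by simp, ?_, ?_, ?_⟩
  · intro e he
    simp only [List.mem_singleton] at he
    subst he
    exact ⟨0, PySem.Dict.get?_insert_self .., le_refl _⟩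
  · intro v hv
    simp only [List.mem_singleton] at hv
    subst hv
    exact ⟨0, PySem.Dict.get?_insert_self .., List.mem_singleton.mpr rfl⟩
  · intro e he _
    simp only [List.mem_singleton] at he
    subst he
    simp

-- ===== VERDICT (by name: the statement is the Claim_ definition above) =====
theorem dijkstra_first_route_spec : Claim_equal_dijkstra_first_route := by
  intro graph start _
  unfold Spec_dijkstra_first_route dijkstra_first_route dijkstra_first_route_alt
  have h := pvLoop_eq graph start (pvFuel graph)
    (PySem.Dict.empty.insert start 0) (PySem.Dict.empty.insert start none)
    [(0, start)] [start] (pvInv_init start)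
  simp only [h]
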